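-- pv_equiv track=rewrite | github.com/Tri11Paragon/Scripts | news/main.py | tally_responses
-- ===== SOURCE A (Python) =====
-- def tally_responses(array: list[str]):
--     yes = 0
--     no = 0
--     err = 0
--     for a in array:
--         if a.upper() == "YES":
--             yes += 1
--         elif a.upper() == "NO":
--             no += 1
--         else:
--             err += 1
--     return yes, no, err
-- ===== SOURCE B (Python) =====
-- def tally_responses(array: list[str]):
--     ups = [a.upper() for a in array]
--     yes = ups.count("YES")
--     no = ups.count("NO")
--     return yes, no, len(array) - yes - no
-- ===== Notes on version B (the rewrite author's own statement) =====
-- stated objective: idiomatic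
-- what changed: Replaces the per-element if/elif/else accumulator loop with list.count over the uppercased list and derives the error bucket arithmetically as len - yes - no.
import Mathlib
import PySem

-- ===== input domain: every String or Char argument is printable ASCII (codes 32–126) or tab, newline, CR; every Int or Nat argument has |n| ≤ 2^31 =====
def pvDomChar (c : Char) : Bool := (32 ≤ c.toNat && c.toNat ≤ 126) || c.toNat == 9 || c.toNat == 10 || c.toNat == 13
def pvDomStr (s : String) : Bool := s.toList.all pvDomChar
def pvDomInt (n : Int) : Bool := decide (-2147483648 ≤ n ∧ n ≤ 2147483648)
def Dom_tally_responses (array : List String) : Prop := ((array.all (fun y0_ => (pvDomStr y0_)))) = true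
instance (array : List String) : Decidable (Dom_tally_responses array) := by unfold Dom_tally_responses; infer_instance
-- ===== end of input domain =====

-- B replaces A's per-element if/elif/else tally loop with counts over the uppercased list and
-- derives the error bucket by subtraction (err = len - yes - no); objective: idiomatic, same cost.

-- ===== PORT A =====
def tally_responses (array : List String) : Int × Int × Int :=
  array.foldl (fun s a =>
    if PySem.Str.upper a = "YES" then (s.1 + 1, s.2.1, s.2.2)
    else if PySem.Str.upper a = "NO" then (s.1, s.2.1 + 1, s.2.2)
    else (s.1, s.2.1, s.2.2 + 1)) (0, 0, 0)

-- ===== PORT B =====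
def tally_responses_alt (array : List String) : Int × Int × Int :=
  let ups := array.map PySem.Str.upper
  let yes : Int := (ups.count "YES" : Int)
  let no : Int := (ups.count "NO" : Int)
  (yes, no, (array.length : Int) - yes - no)

-- ===== PRECONDITION & SPEC =====
def Spec_tally_responses (array : List String) (out : Int × Int × Int) : Prop := out = tally_responses_alt array
instance (array : List String) (out : Int × Int × Int) : Decidable (Spec_tally_responses array out) := by unfold Spec_tally_responses; infer_instance

-- ===== CLAIM (what is proved, stated in full; the proofs are below) =====
def Claim_equal_tally_responses : Prop := ∀ (array : List String), Dom_tally_responses array → Spec_tally_responses array (tally_responses array)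

-- ===== LEMMAS AND PROOFS =====
lemma tally_aux (l : List String) (y n e : Int) :
    l.foldl (fun s a =>
      if PySem.Str.upper a = "YES" then (s.1 + 1, s.2.1, s.2.2)
      else if PySem.Str.upper a = "NO" then (s.1, s.2.1 + 1, s.2.2)
      else (s.1, s.2.1, s.2.2 + 1)) (y, n, e)
    = (y + ((l.map PySem.Str.upper).count "YES" : Int),
       n + ((l.map PySem.Str.upper).count "NO" : Int),
       e + ((l.length : Int) - ((l.map PySem.Str.upper).count "YES" : Int)
              - ((l.map PySem.Str.upper).count "NO" : Int))) := by
  induction l generalizing y n e with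
  | nil => simp
  | cons a t ih =>
    simp only [List.foldl_cons, List.map_cons, List.length_cons, ih, List.count_cons]
    by_cases h1 : PySem.Str.upper a = "YES"
    · simp [h1, Prod.ext_iff]; omega
    · by_cases h2 : PySem.Str.upper a = "NO"
      · simp [h2, Prod.ext_iff]; omega
      · simp [h1, h2, Prod.ext_iff]; omega

-- ===== VERDICT (by name: the statement is the Claim_ definition above) =====
theorem tally_responses_spec : Claim_equal_tally_responses := by
  intro array _
  unfold Spec_tally_responses tally_responses tally_responses_alt
  rw [tally_aux]
  simp
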